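-- pv_equiv track=rewrite | github.com/desecnd/intel-ai4y | hand_processing.py | getCenteredKeypoints
-- ===== SOURCE A (Python) =====
-- def getCenteredKeypoints(points, imgRows, imgCols):
-- 	# -- From points we take only which we have found
-- 	foundPoints = [ p for p in points if p ]
--
-- 	if len(foundPoints) < 2:
-- 		return [ p for p in points ]
--
-- 	minRow = imgRows + 1
-- 	maxRow = -1
-- 	minCol = imgCols + 1
-- 	maxCol = -1
--
-- 	for x,y in foundPoints:
-- 		minRow = min(minRow, y)
-- 		maxRow = max(maxRow, y)
-- 		minCol = min(minCol, x)
-- 		maxCol = max(maxCol, x)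
--
-- 	centerBoxRow = minRow + (maxRow - minRow)//2
-- 	centerBoxCol = minCol + (maxCol - minCol)//2
-- 	centerVector = (imgCols//2 - centerBoxCol, imgRows//2 - centerBoxRow)
--
-- 	centeredPoints  =  [ (p[0] + centerVector[0], p[1] + centerVector[1]) if p else None for p in points ]
-- 	return centeredPoints
-- ===== SOURCE B (Python) =====
-- def _bbox(pts):
--     # bounding box (minx, miny, maxx, maxy) of a nonempty list, by divide and conquer
--     if len(pts) == 1:
--         x, y = pts[0]
--         return (x, y, x, y)
--     m = len(pts) // 2
--     a = _bbox(pts[:m])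
--     b = _bbox(pts[m:])
--     return (min(a[0], b[0]), min(a[1], b[1]), max(a[2], b[2]), max(a[3], b[3]))
--
-- def getCenteredKeypoints(points, imgRows, imgCols):
--     found = [p for p in points if p]
--     if len(found) < 2:
--         return list(points)
--     mnx, mny, mxx, mxy = _bbox(found)
--     dx = imgCols // 2 - (mnx + mxx) // 2
--     dy = imgRows // 2 - (mny + mxy) // 2
--     return [(p[0] + dx, p[1] + dy) if p else None for p in points]
-- ===== Notes on version B (the rewrite author's own statement) =====
-- stated objective: alternative
-- what changed: Replaces A's imperative loop carrying four sentinel-seeded running min/max accumulators by a divide-and-conquer bounding-box function (split the found points in halves, merge the two boxes, no sentinels) and uses the closed-form midpoint (min+max)//2 instead of min+(max-min)//2.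
-- intended difference: When at least two points are found and all of them lie strictly beyond one image edge (every y > imgRows+1, every y < -1, every x > imgCols+1, or every x < -1), A's sentinel seeds clamp the bounding box and A returns points shifted by a wrong clamped center, while B shifts by the true bounding-box center of the keypoints, which is the intended recentering. — e.g. on getCenteredKeypoints([some (0, 100), some (0, 101)], 10, 10): A returns [some (5, 49), some (5, 50)], B returns [some (5, 5), some (5, 6)]
import Mathlib
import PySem

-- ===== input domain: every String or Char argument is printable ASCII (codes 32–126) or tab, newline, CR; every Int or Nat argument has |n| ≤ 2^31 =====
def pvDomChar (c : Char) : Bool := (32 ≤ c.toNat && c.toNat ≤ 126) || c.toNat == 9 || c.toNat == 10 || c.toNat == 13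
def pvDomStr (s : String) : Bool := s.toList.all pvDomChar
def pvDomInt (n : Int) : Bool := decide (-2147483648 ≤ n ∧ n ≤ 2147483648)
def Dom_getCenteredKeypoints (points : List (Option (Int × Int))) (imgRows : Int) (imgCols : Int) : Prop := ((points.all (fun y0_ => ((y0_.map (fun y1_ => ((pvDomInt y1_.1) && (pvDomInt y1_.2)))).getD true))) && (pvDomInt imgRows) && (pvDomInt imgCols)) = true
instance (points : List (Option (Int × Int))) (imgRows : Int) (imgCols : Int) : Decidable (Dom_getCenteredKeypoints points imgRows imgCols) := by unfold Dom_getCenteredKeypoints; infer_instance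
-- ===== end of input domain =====

-- B replaces A's sentinel-seeded iterative min/max loop by a divide-and-conquer
-- bounding-box function (split in halves, merge the two boxes, no sentinels) and the
-- closed-form midpoint (min+max)//2 (objective: alternative).

-- ===== PORT A =====
def getCenteredKeypoints (points : List (Option (Int × Int))) (imgRows : Int) (imgCols : Int) : List (Option (Int × Int)) :=
  let foundPoints := points.filterMap id
  if foundPoints.length < 2 then
    points.map (fun p => p)
  else
    -- the for-loop over foundPoints carrying (minRow, maxRow, minCol, maxCol)
    let st := foundPoints.foldl
      (fun (s : Int × Int × Int × Int) (q : Int × Int) =>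
        (min s.1 q.2, max s.2.1 q.2, min s.2.2.1 q.1, max s.2.2.2 q.1))
      (imgRows + 1, -1, imgCols + 1, -1)
    let centerBoxRow := st.1 + PySem.Int.floordiv (st.2.1 - st.1) 2
    let centerBoxCol := st.2.2.1 + PySem.Int.floordiv (st.2.2.2 - st.2.2.1) 2
    let centerVector := (PySem.Int.floordiv imgCols 2 - centerBoxCol, PySem.Int.floordiv imgRows 2 - centerBoxRow)
    points.map (fun p => match p with
      | some q => some (q.1 + centerVector.1, q.2 + centerVector.2)
      | none => none)

-- ===== PORT B =====
-- _bbox: bounding box of a nonempty list by divide and conquer. The fuel argument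
-- (seeded with the list length) only makes the recursion structural; the [] and
-- fuel-exhausted branches are unreachable on _bbox's actual calls.
def pvBboxGo : Nat → List (Int × Int) → Int × Int × Int × Int
  | _, [] => (0, 0, 0, 0)
  | _, [(x, y)] => (x, y, x, y)
  | 0, _ :: _ :: _ => (0, 0, 0, 0)
  | Nat.succ k, p :: q :: ts =>
    let pts := p :: q :: ts
    let m := pts.length / 2
    let a := pvBboxGo k (pts.take m)
    let b := pvBboxGo k (pts.drop m)
    (min a.1 b.1, min a.2.1 b.2.1, max a.2.2.1 b.2.2.1, max a.2.2.2 b.2.2.2)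

def pvBbox (pts : List (Int × Int)) : Int × Int × Int × Int :=
  pvBboxGo pts.length pts

def getCenteredKeypoints_alt (points : List (Option (Int × Int))) (imgRows : Int) (imgCols : Int) : List (Option (Int × Int)) :=
  let found := points.filterMap id
  if found.length < 2 then
    points
  else
    let b := pvBbox found
    let dx := PySem.Int.floordiv imgCols 2 - PySem.Int.floordiv (b.1 + b.2.2.1) 2
    let dy := PySem.Int.floordiv imgRows 2 - PySem.Int.floordiv (b.2.1 + b.2.2.2) 2
    points.map (fun p => p.map (fun q => (q.1 + dx, q.2 + dy)))

-- ===== PRECONDITION & SPEC =====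
-- When at least two points are found and ALL of them lie strictly beyond one image edge
-- (every y > imgRows+1, every y < -1, every x > imgCols+1, or every x < -1), A's sentinel
-- seeds clamp the bounding box and A shifts by a wrong, clamped center, while B shifts by
-- the true bounding-box center of the keypoints, which is the intended recentering.
def D_getCenteredKeypoints (points : List (Option (Int × Int))) (imgRows : Int) (imgCols : Int) : Prop :=
  2 ≤ (points.filterMap id).length ∧
    ((∀ p ∈ points.filterMap id, imgRows + 1 < p.2) ∨
     (∀ p ∈ points.filterMap id, p.2 < -1) ∨
     (∀ p ∈ points.filterMap id, imgCols + 1 < p.1) ∨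
     (∀ p ∈ points.filterMap id, p.1 < -1))
instance (points : List (Option (Int × Int))) (imgRows : Int) (imgCols : Int) : Decidable (D_getCenteredKeypoints points imgRows imgCols) := by unfold D_getCenteredKeypoints; infer_instance

def Spec_getCenteredKeypoints (points : List (Option (Int × Int))) (imgRows : Int) (imgCols : Int) (out : List (Option (Int × Int))) : Prop := ¬ D_getCenteredKeypoints points imgRows imgCols → out = getCenteredKeypoints_alt points imgRows imgCols
instance (points : List (Option (Int × Int))) (imgRows : Int) (imgCols : Int) (out : List (Option (Int × Int))) : Decidable (Spec_getCenteredKeypoints points imgRows imgCols out) := by unfold Spec_getCenteredKeypoints; infer_instance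

def pvDiffWitness_getCenteredKeypoints : (List (Option (Int × Int))) × Int × Int :=
  ([some (0, 100), some (0, 101)], 10, 10)
def pvDiffWitnessOut_getCenteredKeypoints : (List (Option (Int × Int))) × (List (Option (Int × Int))) :=
  ([some (5, 49), some (5, 50)], [some (5, 5), some (5, 6)])

-- ===== CLAIM (what is proved, stated in full; the proofs are below) =====
def Claim_unchanged_getCenteredKeypoints : Prop := ∀ (points : List (Option (Int × Int))) (imgRows : Int) (imgCols : Int), Dom_getCenteredKeypoints points imgRows imgCols → Spec_getCenteredKeypoints points imgRows imgCols (getCenteredKeypoints points imgRows imgCols)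
def Claim_changed_getCenteredKeypoints : Prop := Dom_getCenteredKeypoints (pvDiffWitness_getCenteredKeypoints.1) (pvDiffWitness_getCenteredKeypoints.2.1) (pvDiffWitness_getCenteredKeypoints.2.2) ∧ D_getCenteredKeypoints (pvDiffWitness_getCenteredKeypoints.1) (pvDiffWitness_getCenteredKeypoints.2.1) (pvDiffWitness_getCenteredKeypoints.2.2) ∧ getCenteredKeypoints (pvDiffWitness_getCenteredKeypoints.1) (pvDiffWitness_getCenteredKeypoints.2.1) (pvDiffWitness_getCenteredKeypoints.2.2) = pvDiffWitnessOut_getCenteredKeypoints.1 ∧ getCenteredKeypoints_alt (pvDiffWitness_getCenteredKeypoints.1) (pvDiffWitness_getCenteredKeypoints.2.1) (pvDiffWitness_getCenteredKeypoints.2.2) = pvDiffWitnessOut_getCenteredKeypoints.2 ∧ pvDiffWitnessOut_getCenteredKeypoints.1 ≠ pvDiffWitnessOut_getCenteredKeypoints.2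

-- ===== LEMMAS AND PROOFS =====

lemma pvFoldlMinAbsorb (t : List Int) : ∀ a y : Int, t.foldl min (min a y) = min a (t.foldl min y) := by
  induction t with
  | nil => intro a y; rfl
  | cons z t ih =>
    intro a y
    simp only [List.foldl_cons, min_assoc]
    exact ih a (min y z)

lemma pvFoldlMaxAbsorb (t : List Int) : ∀ a y : Int, t.foldl max (max a y) = max a (t.foldl max y) := by
  induction t with
  | nil => intro a y; rfl
  | cons z t ih =>
    intro a y
    simp only [List.foldl_cons, max_assoc]
    exact ih a (max y z)

lemma pvFoldlMinLe (t : List Int) : ∀ a : Int, t.foldl min a ≤ a := by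
  induction t with
  | nil => intro a; simp
  | cons z t ih =>
    intro a
    simp only [List.foldl_cons]
    exact le_trans (ih (min a z)) (min_le_left a z)

lemma pvFoldlMaxGe (t : List Int) : ∀ a : Int, a ≤ t.foldl max a := by
  induction t with
  | nil => intro a; simp
  | cons z t ih =>
    intro a
    simp only [List.foldl_cons]
    exact le_trans (le_max_left a z) (ih (max a z))

lemma pvFoldlMinLeMem (t : List Int) : ∀ (a z : Int), z ∈ t → t.foldl min a ≤ z := by
  induction t with
  | nil => intro a z h; cases h
  | cons w t ih =>
    intro a z h
    simp only [List.foldl_cons]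
    rcases List.mem_cons.mp h with h | h
    · rw [h]; exact le_trans (pvFoldlMinLe t (min a w)) (min_le_right a w)
    · exact ih (min a w) z h

lemma pvFoldlMaxGeMem (t : List Int) : ∀ (a z : Int), z ∈ t → z ≤ t.foldl max a := by
  induction t with
  | nil => intro a z h; cases h
  | cons w t ih =>
    intro a z h
    simp only [List.foldl_cons]
    rcases List.mem_cons.mp h with h | h
    · rw [h]; exact le_trans (le_max_right a w) (pvFoldlMaxGe t (max a w))
    · exact ih (max a w) z h

lemma pvMinHeadLe (y : Int) (t : List Int) (z : Int) (h : z ∈ y :: t) : t.foldl min y ≤ z := by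
  rcases List.mem_cons.mp h with h | h
  · rw [h]; exact pvFoldlMinLe t y
  · exact pvFoldlMinLeMem t y z h

lemma pvMaxHeadGe (y : Int) (t : List Int) (z : Int) (h : z ∈ y :: t) : z ≤ t.foldl max y := by
  rcases List.mem_cons.mp h with h | h
  · rw [h]; exact pvFoldlMaxGe t y
  · exact pvFoldlMaxGeMem t y z h

lemma pvFold4 (l : List (Int × Int)) : ∀ a b c d : Int,
    l.foldl (fun (s : Int × Int × Int × Int) (q : Int × Int) =>
        (min s.1 q.2, max s.2.1 q.2, min s.2.2.1 q.1, max s.2.2.2 q.1)) (a, b, c, d)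
      = ((l.map Prod.snd).foldl min a, (l.map Prod.snd).foldl max b,
         (l.map Prod.fst).foldl min c, (l.map Prod.fst).foldl max d) := by
  induction l with
  | nil => intro a b c d; rfl
  | cons q l ih =>
    intro a b c d
    simp only [List.foldl_cons, List.map_cons]
    exact ih _ _ _ _

-- fold-min/max of a nonempty list seeded by its head
def pvFoldMin1 : List Int → Int
  | [] => 0
  | x :: xr => xr.foldl min x
def pvFoldMax1 : List Int → Int
  | [] => 0
  | x :: xr => xr.foldl max x

lemma pvFoldMin1_append (xs ys : List Int) (hx : xs ≠ []) (hy : ys ≠ []) :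
    pvFoldMin1 (xs ++ ys) = min (pvFoldMin1 xs) (pvFoldMin1 ys) := by
  match xs, hx, ys, hy with
  | x :: xr, _, y :: yr, _ =>
    simp only [pvFoldMin1, List.cons_append, List.foldl_append, List.foldl_cons]
    exact pvFoldlMinAbsorb yr _ y

lemma pvFoldMax1_append (xs ys : List Int) (hx : xs ≠ []) (hy : ys ≠ []) :
    pvFoldMax1 (xs ++ ys) = max (pvFoldMax1 xs) (pvFoldMax1 ys) := by
  match xs, hx, ys, hy with
  | x :: xr, _, y :: yr, _ =>
    simp only [pvFoldMax1, List.cons_append, List.foldl_append, List.foldl_cons]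
    exact pvFoldlMaxAbsorb yr _ y

-- B's divide-and-conquer bounding box equals the head-seeded folds of min/max
lemma pvBboxGo_eq (fuel : Nat) : ∀ (l : List (Int × Int)), l ≠ [] → l.length ≤ fuel →
    pvBboxGo fuel l = (pvFoldMin1 (l.map Prod.fst), pvFoldMin1 (l.map Prod.snd),
                       pvFoldMax1 (l.map Prod.fst), pvFoldMax1 (l.map Prod.snd)) := by
  induction fuel with
  | zero =>
    intro l hne hlen
    cases l with
    | nil => exact absurd rfl hne
    | cons a t => simp at hlen
  | succ k ih =>
    intro l hne hlen
    match l, hne with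
    | [(x, y)], _ => simp [pvBboxGo, pvFoldMin1, pvFoldMax1]
    | p :: q :: ts, _ =>
      have hm1 : 1 ≤ (p :: q :: ts).length / 2 := by simp; omega
      have hm2 : (p :: q :: ts).length / 2 < (p :: q :: ts).length := by simp; omega
      have htk : (p :: q :: ts).take ((p :: q :: ts).length / 2) ≠ [] := by
        intro h
        have := congrArg List.length h
        simp [List.length_take] at this
      have hdk : (p :: q :: ts).drop ((p :: q :: ts).length / 2) ≠ [] := by
        intro h
        have := congrArg List.length h
        simp at this
        omega
      have ltk : ((p :: q :: ts).take ((p :: q :: ts).length / 2)).length ≤ k := by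
        simp at hlen ⊢
        omega
      have ldk : ((p :: q :: ts).drop ((p :: q :: ts).length / 2)).length ≤ k := by
        simp at hlen ⊢
        omega
      simp only [pvBboxGo]
      rw [ih _ htk ltk, ih _ hdk ldk]
      have hsplit : p :: q :: ts
          = (p :: q :: ts).take ((p :: q :: ts).length / 2)
            ++ (p :: q :: ts).drop ((p :: q :: ts).length / 2) :=
        (List.take_append_drop _ _).symm
      have hmapne : ∀ (f : Int × Int → Int) (u : List (Int × Int)), u ≠ [] → u.map f ≠ [] := by
        intro f u hu; simpa using hu
      conv_rhs => rw [hsplit]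
      simp only [List.map_append]
      rw [pvFoldMin1_append _ _ (hmapne _ _ htk) (hmapne _ _ hdk),
          pvFoldMin1_append _ _ (hmapne _ _ htk) (hmapne _ _ hdk),
          pvFoldMax1_append _ _ (hmapne _ _ htk) (hmapne _ _ hdk),
          pvFoldMax1_append _ _ (hmapne _ _ htk) (hmapne _ _ hdk)]

lemma pvBbox_eq (l : List (Int × Int)) (hne : l ≠ []) :
    pvBbox l = (pvFoldMin1 (l.map Prod.fst), pvFoldMin1 (l.map Prod.snd),
                pvFoldMax1 (l.map Prod.fst), pvFoldMax1 (l.map Prod.snd)) :=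
  pvBboxGo_eq l.length l hne le_rfl

-- ===== VERDICT (by name: the statement is the Claim_ definition above) =====
theorem getCenteredKeypoints_spec : Claim_unchanged_getCenteredKeypoints := by
  intro points imgRows imgCols _ hD
  unfold getCenteredKeypoints getCenteredKeypoints_alt
  by_cases hlen : (points.filterMap id).length < 2
  · rw [if_pos hlen, if_pos hlen]
    simp
  · rcases hfound : points.filterMap id with _ | ⟨f, fs⟩
    · rw [hfound] at hlen; simp at hlen
    · rw [hfound] at hlen
      unfold D_getCenteredKeypoints at hD
      rw [hfound] at hD
      push Not at hD
      have h2 : 2 ≤ (f :: fs).length := by omega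
      obtain ⟨p1, hp1, hy1⟩ := (hD h2).1
      obtain ⟨p2, hp2, hy2⟩ := (hD h2).2.1
      obtain ⟨p3, hp3, hx3⟩ := (hD h2).2.2.1
      obtain ⟨p4, hp4, hx4⟩ := (hD h2).2.2.2
      have memSnd : ∀ p : Int × Int, p ∈ f :: fs → p.2 ∈ f.2 :: List.map Prod.snd fs := by
        intro p hp
        rcases List.mem_cons.mp hp with h | h
        · rw [h]; exact List.mem_cons_self
        · exact List.mem_cons_of_mem _ (List.mem_map_of_mem h)
      have memFst : ∀ p : Int × Int, p ∈ f :: fs → p.1 ∈ f.1 :: List.map Prod.fst fs := by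
        intro p hp
        rcases List.mem_cons.mp hp with h | h
        · rw [h]; exact List.mem_cons_self
        · exact List.mem_cons_of_mem _ (List.mem_map_of_mem h)
      simp only [if_neg hlen, pvFold4, List.foldl_cons,
        pvFoldlMinAbsorb, pvFoldlMaxAbsorb,
        pvBbox_eq (f :: fs) (by simp), List.map_cons, pvFoldMin1, pvFoldMax1]
      have m1 : min (imgRows + 1) (List.foldl min f.2 (List.map Prod.snd fs))
          = List.foldl min f.2 (List.map Prod.snd fs) :=
        min_eq_right (le_trans (pvMinHeadLe f.2 (List.map Prod.snd fs) p1.2 (memSnd p1 hp1)) hy1)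
      have m2 : max (-1) (List.foldl max f.2 (List.map Prod.snd fs))
          = List.foldl max f.2 (List.map Prod.snd fs) :=
        max_eq_right (le_trans hy2 (pvMaxHeadGe f.2 (List.map Prod.snd fs) p2.2 (memSnd p2 hp2)))
      have m3 : min (imgCols + 1) (List.foldl min f.1 (List.map Prod.fst fs))
          = List.foldl min f.1 (List.map Prod.fst fs) :=
        min_eq_right (le_trans (pvMinHeadLe f.1 (List.map Prod.fst fs) p3.1 (memFst p3 hp3)) hx3)
      have m4 : max (-1) (List.foldl max f.1 (List.map Prod.fst fs))
          = List.foldl max f.1 (List.map Prod.fst fs) :=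
        max_eq_right (le_trans hx4 (pvMaxHeadGe f.1 (List.map Prod.fst fs) p4.1 (memFst p4 hp4)))
      rw [m1, m2, m3, m4]
      have key : ∀ a mn mx c : Int,
          a + (PySem.Int.floordiv c 2 - (mn + PySem.Int.floordiv (mx - mn) 2))
            = a + (PySem.Int.floordiv c 2 - PySem.Int.floordiv (mn + mx) 2) := by
        intro a mn mx c
        simp only [PySem.Int.floordiv_eq_ediv_of_pos (show (0:Int) < 2 by norm_num)]
        omega
      apply List.map_congr_left
      intro p _
      cases p with
      | none => rfl
      | some q =>
        simp only [Option.map_some]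
        rw [key, key]

theorem getCenteredKeypoints_changed : Claim_changed_getCenteredKeypoints := by
  unfold Claim_changed_getCenteredKeypoints; decide
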